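-- pv_equiv track=rewrite | github.com/msio900/coding_test | programmers_practice/programmers_42889.py | solution
-- ===== SOURCE A (Python) =====
-- def solution(n, lost, reserve):
--     answer = n
--
--     new_lost = [l for l in lost if l not in reserve]
--     new_lost.sort()
--     new_reserve = [l for l in reserve if l not in lost]
--     new_reserve.sort()
--
--     for l in new_lost:
--         if l - 1 in new_reserve:
--             new_reserve.remove(l - 1)
--         elif l + 1 in new_reserve:
--             new_reserve.remove(l + 1)
--         else:
--             answer -= 1
--
--     return answer
-- ===== SOURCE B (Python) =====
-- def solution(n, lost, reserve):
--     rset = set(reserve)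
--     lset = set(lost)
--     L = sorted(x for x in lost if x not in rset)
--     R = sorted(x for x in reserve if x not in lset)
--     i = j = 0
--     matched = 0
--     while i < len(L) and j < len(R):
--         if R[j] == L[i] - 1 or R[j] == L[i] + 1:
--             matched += 1
--             i += 1
--             j += 1
--         elif R[j] < L[i] - 1:
--             j += 1
--         else:
--             i += 1
--     return n - (len(L) - matched)
-- ===== Notes on version B (the rewrite author's own statement) =====
-- stated objective: faster
-- what changed: Replaces the per-lost-student linear membership tests and list.remove calls on the mutable reserve list with set-based filtering plus a single two-pointer merge sweep over the two sorted lists.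
import Mathlib
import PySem

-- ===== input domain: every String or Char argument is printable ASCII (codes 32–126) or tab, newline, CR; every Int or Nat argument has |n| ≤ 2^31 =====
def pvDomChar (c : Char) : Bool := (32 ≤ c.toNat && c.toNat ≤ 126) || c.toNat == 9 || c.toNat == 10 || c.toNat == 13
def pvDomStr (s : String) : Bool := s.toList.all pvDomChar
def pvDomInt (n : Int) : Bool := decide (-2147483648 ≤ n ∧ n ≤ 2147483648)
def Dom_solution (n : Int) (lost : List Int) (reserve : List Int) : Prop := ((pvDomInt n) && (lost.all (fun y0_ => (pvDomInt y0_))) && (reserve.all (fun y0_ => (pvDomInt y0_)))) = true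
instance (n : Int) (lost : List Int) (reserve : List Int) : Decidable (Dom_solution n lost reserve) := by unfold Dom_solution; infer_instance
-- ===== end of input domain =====

-- B replaces A's per-lost-student membership tests and removals on the reserve list
-- by set-filtering and one two-pointer merge sweep over the two sorted lists (faster).

-- ===== PORT A =====
-- the for-loop over new_lost, state = (remaining reserve list, answer);
-- `.remove` is only reached under the membership guard, where remove? is some, so getD is exact
def aLoop : List Int → List Int → Int → Int
  | [], _, answer => answer
  | l :: ls, r, answer =>
    if (l - 1) ∈ r then aLoop ls ((PySem.List.remove? r (l - 1)).getD r) answer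
    else if (l + 1) ∈ r then aLoop ls ((PySem.List.remove? r (l + 1)).getD r) answer
    else aLoop ls r (answer - 1)

def solution (n : Int) (lost : List Int) (reserve : List Int) : Int :=
  let newLost := PySem.List.sorted (lost.filter (fun l => !(reserve.contains l))) (fun x => x) false
  let newReserve := PySem.List.sorted (reserve.filter (fun l => !(lost.contains l))) (fun x => x) false
  aLoop newLost newReserve n

-- ===== PORT B =====
-- the while-loop over indices i, j: advancing i/j = consuming the heads of L/R
def bMerge : List Int → List Int → Int
  | [], _ => 0
  | _ :: _, [] => 0
  | l :: ls, r :: rs =>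
    if r = l - 1 ∨ r = l + 1 then 1 + bMerge ls rs
    else if r < l - 1 then bMerge (l :: ls) rs
    else bMerge ls (r :: rs)
termination_by L R => L.length + R.length

def solution_alt (n : Int) (lost : List Int) (reserve : List Int) : Int :=
  let L := PySem.List.sorted (lost.filter (fun x => !((PySem.Set.ofList reserve).contains x))) (fun x => x) false
  let R := PySem.List.sorted (reserve.filter (fun x => !((PySem.Set.ofList lost).contains x))) (fun x => x) false
  n - ((L.length : Int) - bMerge L R)

-- ===== PRECONDITION & SPEC =====
def Spec_solution (n : Int) (lost : List Int) (reserve : List Int) (out : Int) : Prop := out = solution_alt n lost reserve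
instance (n : Int) (lost : List Int) (reserve : List Int) (out : Int) : Decidable (Spec_solution n lost reserve out) := by unfold Spec_solution; infer_instance

-- ===== CLAIM (what is proved, stated in full; the proofs are below) =====
def Claim_equal_solution : Prop := ∀ (n : Int) (lost : List Int) (reserve : List Int), Dom_solution n lost reserve → Spec_solution n lost reserve (solution n lost reserve)

-- ===== LEMMAS AND PROOFS =====

-- under the membership guard, Python's .remove = List.erase
lemma remove_getD_of_mem {r : List Int} {v : Int} (h : v ∈ r) :
    (PySem.List.remove? r v).getD r = r.erase v := by
  rw [PySem.List.remove?_eq_some_erase _ _ h]; rfl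

-- the merge loop with an exhausted reserve matches nothing
lemma bMerge_nil_right (ls : List Int) : bMerge ls [] = 0 := by
  cases ls <;> simp [bMerge]

-- a reserve head strictly below every (lost - 1) is never probed nor removed
lemma aLoop_drop_head (L : List Int) (r : Int) (rs : List Int) (a : Int)
    (h : ∀ l ∈ L, r < l - 1) :
    aLoop L (r :: rs) a = aLoop L rs a := by
  induction L generalizing rs a with
  | nil => rfl
  | cons l ls ih =>
    have hr := h l (by simp)
    have h1 : ((l - 1) ∈ r :: rs) ↔ ((l - 1) ∈ rs) := by
      simp only [List.mem_cons]
      constructor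
      · rintro (h' | h')
        · omega
        · exact h'
      · exact Or.inr
    have h2 : ((l + 1) ∈ r :: rs) ↔ ((l + 1) ∈ rs) := by
      simp only [List.mem_cons]
      constructor
      · rintro (h' | h')
        · omega
        · exact h'
      · exact Or.inr
    have htl : ∀ l' ∈ ls, r < l' - 1 := fun l' hl' => h l' (by simp [hl'])
    by_cases hm1 : (l - 1) ∈ rs
    · have hm1' : (l - 1) ∈ r :: rs := h1.mpr hm1
      rw [aLoop, aLoop, if_pos hm1', if_pos hm1,
        remove_getD_of_mem hm1', remove_getD_of_mem hm1,
        List.erase_cons_tail (by simp; omega)]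
      exact ih (rs.erase (l - 1)) a htl
    · have hm1' : (l - 1) ∉ r :: rs := fun hc => hm1 (h1.mp hc)
      by_cases hm2 : (l + 1) ∈ rs
      · have hm2' : (l + 1) ∈ r :: rs := h2.mpr hm2
        rw [aLoop, aLoop, if_neg hm1', if_neg hm1, if_pos hm2', if_pos hm2,
          remove_getD_of_mem hm2', remove_getD_of_mem hm2,
          List.erase_cons_tail (by simp; omega)]
        exact ih (rs.erase (l + 1)) a htl
      · have hm2' : (l + 1) ∉ r :: rs := fun hc => hm2 (h2.mp hc)
        rw [aLoop, aLoop, if_neg hm1', if_neg hm1, if_neg hm2', if_neg hm2]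
        exact ih rs (a - 1) htl

-- the core equivalence: on sorted, disjoint lists A's greedy loop counts exactly
-- what the two-pointer merge matches
lemma key (k : Nat) : ∀ (L R : List Int) (a : Int), L.length + R.length ≤ k →
    L.Pairwise (· ≤ ·) → R.Pairwise (· ≤ ·) → (∀ x ∈ L, x ∉ R) →
    aLoop L R a = a - ((L.length : Int) - bMerge L R) := by
  induction k with
  | zero =>
    intro L R a hk _ _ _
    have : L = [] := by cases L <;> simp_all
    subst this; simp [aLoop, bMerge]
  | succ k ih =>
    intro L R a hk hL hR hdisj
    match L, R with
    | [], R => simp [aLoop, bMerge]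
    | l :: ls, [] =>
      rw [aLoop]
      simp only [List.not_mem_nil, if_false]
      rw [ih ls [] (a - 1) (by simp at hk ⊢; omega) (List.Pairwise.of_cons hL)
        List.Pairwise.nil (by intro x _; simp), bMerge_nil_right, bMerge_nil_right]
      simp; ring
    | l :: ls, r :: rs =>
      have hLle : ∀ x ∈ ls, l ≤ x := fun x hx => (List.pairwise_cons.mp hL).1 x hx
      have hRle : ∀ x ∈ rs, r ≤ x := fun x hx => (List.pairwise_cons.mp hR).1 x hx
      have hne : r ≠ l := fun hc => hdisj l (by simp) (by simp [← hc])
      have hLtl := (List.pairwise_cons.mp hL).2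
      have hRtl := (List.pairwise_cons.mp hR).2
      have hdisjtl : ∀ x ∈ ls, x ∉ rs := fun x hx hc =>
        hdisj x (by simp [hx]) (by simp [hc])
      by_cases h1 : r = l - 1
      · -- match downward: head of reserve is removed
        have hm : (l - 1) ∈ r :: rs := by simp [h1]
        rw [aLoop, if_pos hm, remove_getD_of_mem hm, ← h1, List.erase_cons_head,
          ih ls rs a (by simp at hk ⊢; omega) hLtl hRtl hdisjtl,
          bMerge, if_pos (Or.inl h1)]
        simp only [List.length_cons]; push_cast; ring
      · by_cases h2 : r = l + 1
        · -- match upward: l-1 < r ≤ all of reserve, so l-1 absent; l+1 is the head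
          have hm1 : (l - 1) ∉ r :: rs := by
            simp only [List.mem_cons]
            rintro (hc | hc)
            · omega
            · have := hRle _ hc; omega
          have hm2 : (l + 1) ∈ r :: rs := by simp [h2]
          rw [aLoop, if_neg hm1, if_pos hm2, remove_getD_of_mem hm2, ← h2,
            List.erase_cons_head,
            ih ls rs a (by simp at hk ⊢; omega) hLtl hRtl hdisjtl,
            bMerge, if_pos (Or.inr h2)]
          simp only [List.length_cons]; push_cast; ring
        · by_cases h3 : r < l - 1
          · -- reserve head too small: it is dead weight for every remaining lost student
            have hdrop : ∀ l' ∈ l :: ls, r < l' - 1 := by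
              intro l' hl'
              rcases List.mem_cons.mp hl' with h | h
              · omega
              · have := hLle _ h; omega
            rw [aLoop_drop_head _ _ _ _ hdrop,
              ih (l :: ls) rs a (by simp at hk ⊢; omega) hL hRtl
                (fun x hx hc => hdisj x hx (by simp [hc])),
              bMerge, if_neg (by omega), if_pos h3]
          · -- reserve head too big: neither l-1 nor l+1 is anywhere in reserve
            have hm1 : (l - 1) ∉ r :: rs := by
              simp only [List.mem_cons]
              rintro (hc | hc)
              · omega
              · have := hRle _ hc; omega
            have hm2 : (l + 1) ∉ r :: rs := by
              simp only [List.mem_cons]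
              rintro (hc | hc)
              · omega
              · have := hRle _ hc; omega
            rw [aLoop, if_neg hm1, if_neg hm2,
              ih ls (r :: rs) (a - 1) (by simp at hk ⊢; omega) hLtl hR
                (fun x hx hc => hdisj x (by simp [hx]) hc),
              bMerge, if_neg (by omega), if_neg h3]
            simp only [List.length_cons]; push_cast; ring

-- the two ports filter with the same predicate (list membership vs set membership)
lemma filter_set_eq (xs ys : List Int) :
    xs.filter (fun x => !((PySem.Set.ofList ys).contains x)) =
    xs.filter (fun x => !(ys.contains x)) := by
  apply List.filter_congr
  intro x _
  simp [PySem.Set.contains_eq_listContains, PySem.Set.mem_ofList]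

-- ===== VERDICT (by name: the statement is the Claim_ definition above) =====
theorem solution_spec : Claim_equal_solution := by
  intro n lost reserve _
  unfold Spec_solution solution solution_alt
  rw [filter_set_eq, filter_set_eq]
  set L := PySem.List.sorted (lost.filter (fun l => !(reserve.contains l))) (fun x => x) false with hLdef
  set R := PySem.List.sorted (reserve.filter (fun l => !(lost.contains l))) (fun x => x) false with hRdef
  have hL : L.Pairwise (· ≤ ·) := PySem.List.sorted_pairwise _ _
  have hR : R.Pairwise (· ≤ ·) := PySem.List.sorted_pairwise _ _
  have hdisj : ∀ x ∈ L, x ∉ R := by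
    intro x hx hxR
    rw [hLdef, PySem.List.mem_sorted, List.mem_filter] at hx
    rw [hRdef, PySem.List.mem_sorted, List.mem_filter] at hxR
    simp at hx hxR
    exact hxR.2 hx.1
  exact key (L.length + R.length) L R n le_rfl hL hR hdisj
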